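-- pv_equiv track=rewrite | github.com/yangao07/NanoClu | cluster_by_splice_site.py | assign_se_site_bin
-- ===== SOURCE A (Python) =====
-- import collections as cl
--
-- def assign_se_site_bin(site_seq, start_site_bin, end_site_bin):
--     bin_seq_set = cl.defaultdict(list)  # (first_bin, last_bin) : seq
--     # assign site to bin
--     for site, seq in site_seq.items():
--         # site[0] : (start, end)
--         # site[1] : (five_site1, five_site2 ...)
--         # site[2] : (three_site1, three_site2 ...)
--         start_bin = [start_bin for start_bin in start_site_bin if start_bin[1] >= site[0][0] >= start_bin[0]]
--         if len(start_bin) != 1: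
--             continue
--         end_bin = [end_bin for end_bin in end_site_bin if end_bin[1] >= site[0][1] >= end_bin[0]]
--         if len(end_bin) != 1:
--             continue
--
--         start_bin = start_bin[0]
--         end_bin = end_bin[0]
--
--         if (start_bin, end_bin) in bin_seq_set:
--             bin_seq_set[(start_bin, end_bin)].extend(seq)
--         else:
--             bin_seq_set[(start_bin, end_bin)] = seq
--     return bin_seq_set
-- ===== SOURCE B (Python) =====
-- def assign_se_site_bin(site_seq, start_site_bin, end_site_bin):
--     # Early-exit unique-containing-bin scan (stops at the 2nd hit) with a
--     # per-coordinate memo dict, instead of materialising a full filter list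
--     # per site; accumulation by plain get-and-reassign instead of
--     # membership-test / extend-or-alias (so B never aliases a caller's list).
--     def unique_bin(bins, x, cache):
--         if x in cache:
--             return cache[x]
--         found = None
--         for b in bins:
--             if b[0] <= x <= b[1]:
--                 if found is not None:
--                     found = None
--                     break
--                 found = b
--         cache[x] = found
--         return found
--
--     start_cache = {}
--     end_cache = {}
--     out = {}
--     for site, seq in site_seq.items():
--         if not start_site_bin or not end_site_bin:
--             continue
--         sb = unique_bin(start_site_bin, site[0][0], start_cache)
--         if sb is None:
--             continue
--         eb = unique_bin(end_site_bin, site[0][1], end_cache)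
--         if eb is None:
--             continue
--         out[(sb, eb)] = out.get((sb, eb), []) + list(seq)
--     return out
-- ===== Notes on version B (the rewrite author's own statement) =====
-- stated objective: alternative
-- what changed: B replaces A's two full list-comprehension filter passes per site by an early-exit scan that stops at the second containing bin, memoises the unique-bin answer per distinct coordinate in a dict so repeated coordinates never rescan the bins, and accumulates with get-and-reassign instead of membership-test-then-extend-or-alias.
import Mathlib
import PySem

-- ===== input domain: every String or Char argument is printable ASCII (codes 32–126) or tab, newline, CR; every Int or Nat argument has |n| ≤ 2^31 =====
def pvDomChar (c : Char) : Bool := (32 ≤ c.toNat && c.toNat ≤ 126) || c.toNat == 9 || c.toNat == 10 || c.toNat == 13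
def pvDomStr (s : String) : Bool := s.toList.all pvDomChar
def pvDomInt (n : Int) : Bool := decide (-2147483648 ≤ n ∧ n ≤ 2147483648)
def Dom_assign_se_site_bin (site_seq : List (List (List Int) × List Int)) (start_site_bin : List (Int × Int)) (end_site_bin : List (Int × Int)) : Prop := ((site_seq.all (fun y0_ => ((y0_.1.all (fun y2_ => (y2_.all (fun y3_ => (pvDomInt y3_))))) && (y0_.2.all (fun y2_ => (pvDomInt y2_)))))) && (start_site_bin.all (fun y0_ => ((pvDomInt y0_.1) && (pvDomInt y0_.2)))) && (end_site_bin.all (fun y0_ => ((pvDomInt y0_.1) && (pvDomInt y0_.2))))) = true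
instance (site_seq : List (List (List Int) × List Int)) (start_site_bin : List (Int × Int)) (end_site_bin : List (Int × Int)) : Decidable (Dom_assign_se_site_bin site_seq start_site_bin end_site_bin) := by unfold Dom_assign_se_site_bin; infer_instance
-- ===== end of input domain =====

-- B replaces A's per-site full filter passes by an early-exit unique-bin scan with a
-- per-coordinate memo dict and get-and-reassign accumulation (objective: alternative;
-- return-value equivalence only — A may alias/extend a caller's seq list, B never mutates).

-- ===== PORT A =====
def assign_se_site_bin (site_seq : List (List (List Int) × List Int)) (start_site_bin : List (Int × Int)) (end_site_bin : List (Int × Int)) : List ((Int × Int) × (Int × Int) × List Int) :=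
  (site_seq.foldl
    (fun d p =>
      let site := p.1
      let seq := p.2
      let s0 := (PySem.List.pyGet? site 0).getD []
      let a := (PySem.List.pyGet? s0 0).getD 0
      let start_bin := start_site_bin.filter (fun b => decide (b.2 ≥ a ∧ a ≥ b.1))
      if start_bin.length ≠ 1 then d
      else
        let c := (PySem.List.pyGet? s0 1).getD 0
        let end_bin := end_site_bin.filter (fun b => decide (b.2 ≥ c ∧ c ≥ b.1))
        if end_bin.length ≠ 1 then d
        else
          let sb := (PySem.List.pyGet? start_bin 0).getD (0, 0)
          let eb := (PySem.List.pyGet? end_bin 0).getD (0, 0)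
          if d.contains (sb, eb) then d.modify (sb, eb) [] (fun v => v ++ seq)
          else d.insert (sb, eb) seq)
    (PySem.Dict.empty : PySem.Dict ((Int × Int) × (Int × Int)) (List Int))).items.map
    (fun q => (q.1.1, q.1.2, q.2))

-- ===== PORT B =====
-- early-exit scan for the unique bin containing x (none if 0 or ≥ 2 bins contain x)
def pvUniqueBinGo (x : Int) (found : Option (Int × Int)) : List (Int × Int) → Option (Int × Int)
  | [] => found
  | b :: rest =>
    if b.1 ≤ x ∧ x ≤ b.2 then
      match found with
      | some _ => none
      | none => pvUniqueBinGo x (some b) rest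
    else pvUniqueBinGo x found rest

-- memoised wrapper: returns the answer and the updated cache
def pvUniqueBin (bins : List (Int × Int)) (x : Int)
    (cache : PySem.Dict Int (Option (Int × Int))) :
    Option (Int × Int) × PySem.Dict Int (Option (Int × Int)) :=
  match cache.get? x with
  | some r => (r, cache)
  | none =>
    let r := pvUniqueBinGo x none bins
    (r, cache.insert x r)

def assign_se_site_bin_alt (site_seq : List (List (List Int) × List Int)) (start_site_bin : List (Int × Int)) (end_site_bin : List (Int × Int)) : List ((Int × Int) × (Int × Int) × List Int) :=
  ((site_seq.foldl
    (fun st p =>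
      if start_site_bin.isEmpty || end_site_bin.isEmpty then st
      else
        let s0 := (PySem.List.pyGet? p.1 0).getD []
        let r1 := pvUniqueBin start_site_bin ((PySem.List.pyGet? s0 0).getD 0) st.1
        match r1.1 with
        | none => (r1.2, st.2.1, st.2.2)
        | some sb =>
          let r2 := pvUniqueBin end_site_bin ((PySem.List.pyGet? s0 1).getD 0) st.2.1
          match r2.1 with
          | none => (r1.2, r2.2, st.2.2)
          | some eb =>
            (r1.2, r2.2, st.2.2.insert (sb, eb) (st.2.2.getD (sb, eb) [] ++ p.2)))
    ((PySem.Dict.empty, PySem.Dict.empty, PySem.Dict.empty) :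
      PySem.Dict Int (Option (Int × Int)) × PySem.Dict Int (Option (Int × Int)) ×
      PySem.Dict ((Int × Int) × (Int × Int)) (List Int))).2.2).items.map
    (fun q => (q.1.1, q.1.2, q.2))

-- ===== PRECONDITION & SPEC =====
-- Pre_ excludes exactly the inputs on which Python A raises IndexError: a site whose
-- first tuple is absent or empty while start_site_bin is non-empty (site[0][0]), or whose
-- first tuple has length 1 while its start coordinate lies in exactly one start bin and
-- end_site_bin is non-empty (site[0][1]).
def Pre_assign_se_site_bin (site_seq : List (List (List Int) × List Int)) (start_site_bin : List (Int × Int)) (end_site_bin : List (Int × Int)) : Prop :=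
  ∀ p ∈ site_seq,
    start_site_bin = [] ∨
    (p.1 ≠ [] ∧ p.1.headI ≠ [] ∧
      (end_site_bin = [] ∨
       (start_site_bin.countP (fun b => decide (b.2 ≥ p.1.headI.headI ∧ p.1.headI.headI ≥ b.1)) ≠ 1) ∨
       2 ≤ p.1.headI.length))
instance (site_seq : List (List (List Int) × List Int)) (start_site_bin : List (Int × Int)) (end_site_bin : List (Int × Int)) : Decidable (Pre_assign_se_site_bin site_seq start_site_bin end_site_bin) := by unfold Pre_assign_se_site_bin; infer_instance

def pvWitness_assign_se_site_bin : (List (List (List Int) × List Int)) × (List (Int × Int)) × (List (Int × Int)) :=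
  ([([[1, 2]], [5, 7])], [(0, 2)], [(1, 3)])

def Spec_assign_se_site_bin (site_seq : List (List (List Int) × List Int)) (start_site_bin : List (Int × Int)) (end_site_bin : List (Int × Int)) (out : List ((Int × Int) × (Int × Int) × List Int)) : Prop := out = assign_se_site_bin_alt site_seq start_site_bin end_site_bin
instance (site_seq : List (List (List Int) × List Int)) (start_site_bin : List (Int × Int)) (end_site_bin : List (Int × Int)) (out : List ((Int × Int) × (Int × Int) × List Int)) : Decidable (Spec_assign_se_site_bin site_seq start_site_bin end_site_bin out) := by unfold Spec_assign_se_site_bin; infer_instance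

-- ===== CLAIM (what is proved, stated in full; the proofs are below) =====
def Claim_equal_assign_se_site_bin : Prop := ∀ (site_seq : List (List (List Int) × List Int)) (start_site_bin : List (Int × Int)) (end_site_bin : List (Int × Int)), Dom_assign_se_site_bin site_seq start_site_bin end_site_bin → Pre_assign_se_site_bin site_seq start_site_bin end_site_bin → Spec_assign_se_site_bin site_seq start_site_bin end_site_bin (assign_se_site_bin site_seq start_site_bin end_site_bin)
-- ===== LEMMAS AND PROOFS =====

-- the predicate A filters with
def pvPA (x : Int) : (Int × Int) → Bool := fun b => decide (b.2 ≥ x ∧ x ≥ b.1)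

-- the two fold bodies, named for the proofs (definitionally the lambdas of the ports)
def pvStepA (ssb esb : List (Int × Int))
    (d : PySem.Dict ((Int × Int) × (Int × Int)) (List Int))
    (p : List (List Int) × List Int) : PySem.Dict ((Int × Int) × (Int × Int)) (List Int) :=
  let site := p.1
  let seq := p.2
  let s0 := (PySem.List.pyGet? site 0).getD []
  let a := (PySem.List.pyGet? s0 0).getD 0
  let start_bin := ssb.filter (pvPA a)
  if start_bin.length ≠ 1 then d
  else
    let c := (PySem.List.pyGet? s0 1).getD 0
    let end_bin := esb.filter (pvPA c)
    if end_bin.length ≠ 1 then d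
    else
      let sb := (PySem.List.pyGet? start_bin 0).getD (0, 0)
      let eb := (PySem.List.pyGet? end_bin 0).getD (0, 0)
      if d.contains (sb, eb) then d.modify (sb, eb) [] (fun v => v ++ seq)
      else d.insert (sb, eb) seq

def pvStepB (ssb esb : List (Int × Int))
    (st : PySem.Dict Int (Option (Int × Int)) × PySem.Dict Int (Option (Int × Int)) ×
          PySem.Dict ((Int × Int) × (Int × Int)) (List Int))
    (p : List (List Int) × List Int) :
    PySem.Dict Int (Option (Int × Int)) × PySem.Dict Int (Option (Int × Int)) ×
    PySem.Dict ((Int × Int) × (Int × Int)) (List Int) :=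
  if ssb.isEmpty || esb.isEmpty then st
  else
    let s0 := (PySem.List.pyGet? p.1 0).getD []
    let r1 := pvUniqueBin ssb ((PySem.List.pyGet? s0 0).getD 0) st.1
    match r1.1 with
    | none => (r1.2, st.2.1, st.2.2)
    | some sb =>
      let r2 := pvUniqueBin esb ((PySem.List.pyGet? s0 1).getD 0) st.2.1
      match r2.1 with
      | none => (r1.2, r2.2, st.2.2)
      | some eb =>
        (r1.2, r2.2, st.2.2.insert (sb, eb) (st.2.2.getD (sb, eb) [] ++ p.2))

theorem pvPA_iff (x : Int) (b : Int × Int) : pvPA x b = true ↔ (b.1 ≤ x ∧ x ≤ b.2) := by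
  simp [pvPA]; omega

theorem pvUniqueBinGo_some (x : Int) (f : Int × Int) :
    ∀ bins : List (Int × Int),
      pvUniqueBinGo x (some f) bins = if bins.filter (pvPA x) = [] then some f else none := by
  intro bins
  induction bins with
  | nil => simp [pvUniqueBinGo]
  | cons b rest ih =>
    by_cases h : (b.1 ≤ x ∧ x ≤ b.2)
    · have hb : pvPA x b = true := (pvPA_iff x b).mpr h
      simp [pvUniqueBinGo, h, hb]
    · have hb : pvPA x b = false := by
        simp only [Bool.eq_false_iff]; exact fun hc => h ((pvPA_iff x b).mp hc)
      rw [List.filter_cons_of_neg (by simp [hb])] at *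
      simp [pvUniqueBinGo, if_neg h, ih]

theorem pvUniqueBinGo_none (x : Int) :
    ∀ bins : List (Int × Int),
      pvUniqueBinGo x none bins =
        (match bins.filter (pvPA x) with
          | [b] => some b
          | _ => none) := by
  intro bins
  induction bins with
  | nil => simp [pvUniqueBinGo]
  | cons b rest ih =>
    by_cases h : (b.1 ≤ x ∧ x ≤ b.2)
    · have hb : pvPA x b = true := (pvPA_iff x b).mpr h
      rw [List.filter_cons_of_pos (by simp [hb])]
      simp only [pvUniqueBinGo, if_pos h]
      rw [pvUniqueBinGo_some]
      rcases hf : rest.filter (pvPA x) with _ | ⟨c, t⟩ <;> simp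
    · have hb : pvPA x b = false := by
        simp only [Bool.eq_false_iff]; exact fun hc => h ((pvPA_iff x b).mp hc)
      rw [List.filter_cons_of_neg (by simp [hb])]
      simp only [pvUniqueBinGo, if_neg h]
      exact ih

-- cache invariant
def pvInv (bins : List (Int × Int)) (cache : PySem.Dict Int (Option (Int × Int))) : Prop :=
  ∀ x r, cache.get? x = some r → r = pvUniqueBinGo x none bins

theorem pvInv_empty (bins : List (Int × Int)) : pvInv bins PySem.Dict.empty := by
  intro x r h
  simp [PySem.Dict.get?_empty] at h

theorem pvUniqueBin_fst (bins : List (Int × Int)) (x : Int)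
    (cache : PySem.Dict Int (Option (Int × Int))) (h : pvInv bins cache) :
    (pvUniqueBin bins x cache).1 = pvUniqueBinGo x none bins := by
  unfold pvUniqueBin
  rcases hc : cache.get? x with _ | r
  · simp
  · simpa using h x r hc

theorem pvUniqueBin_inv (bins : List (Int × Int)) (x : Int)
    (cache : PySem.Dict Int (Option (Int × Int))) (h : pvInv bins cache) :
    pvInv bins (pvUniqueBin bins x cache).2 := by
  intro y r' hy
  unfold pvUniqueBin at hy
  rcases hc : cache.get? x with _ | r
  · rw [hc] at hy
    simp only at hy
    rw [PySem.Dict.get?_insert] at hy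
    by_cases hxy : y = x
    · rw [if_pos hxy] at hy
      subst hxy
      exact (Option.some.inj hy).symm
    · rw [if_neg hxy] at hy
      exact h y r' hy
  · rw [hc] at hy
    exact h y r' hy

theorem pvGet_singleton (x : Int × Int) :
    (PySem.List.pyGet? [x] (0 : Int)).getD (0, 0) = x := by
  simp [PySem.List.pyGet?, PySem.List.pyIdx?]

-- one step of B computes one step of A on the output dict and preserves both cache invariants
theorem pvStep_eq (ssb esb : List (Int × Int))
    (st : PySem.Dict Int (Option (Int × Int)) × PySem.Dict Int (Option (Int × Int)) ×
          PySem.Dict ((Int × Int) × (Int × Int)) (List Int))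
    (p : List (List Int) × List Int)
    (h1 : pvInv ssb st.1) (h2 : pvInv esb st.2.1) :
    (pvStepB ssb esb st p).2.2 = pvStepA ssb esb st.2.2 p ∧
    pvInv ssb (pvStepB ssb esb st p).1 ∧ pvInv esb (pvStepB ssb esb st p).2.1 := by
  by_cases hs : ssb = []
  · have hg : pvStepB ssb esb st p = st := by simp [pvStepB, hs]
    refine ⟨?_, by rw [hg]; exact h1, by rw [hg]; exact h2⟩
    rw [hg]
    simp [pvStepA, hs]
  · by_cases he : esb = []
    · have hg : pvStepB ssb esb st p = st := by simp [pvStepB, he]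
      refine ⟨?_, by rw [hg]; exact h1, by rw [hg]; exact h2⟩
      rw [hg]
      by_cases hl : (ssb.filter (pvPA ((PySem.List.pyGet? ((PySem.List.pyGet? p.1 0).getD []) 0).getD 0))).length ≠ 1 <;>
        simp [pvStepA, he, hl]
    · have hg : (ssb.isEmpty || esb.isEmpty) = false := by
        simp [hs, he]
      have hr1f := pvUniqueBin_fst ssb ((PySem.List.pyGet? ((PySem.List.pyGet? p.1 0).getD []) 0).getD 0) st.1 h1
      have hr1i := pvUniqueBin_inv ssb ((PySem.List.pyGet? ((PySem.List.pyGet? p.1 0).getD []) 0).getD 0) st.1 h1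
      rw [pvUniqueBinGo_none] at hr1f
      rcases hf1 : ssb.filter (pvPA ((PySem.List.pyGet? ((PySem.List.pyGet? p.1 0).getD []) 0).getD 0)) with _ | ⟨sb0, t1⟩
      · rw [hf1] at hr1f
        refine ⟨?_, ?_, ?_⟩ <;>
          simp only [pvStepB, hg, Bool.false_eq_true, if_false, hr1f] <;>
          first
            | (exact hr1i)
            | (exact h2)
            | (simp only [pvStepA]; rw [hf1]; simp)
      · rcases t1 with _ | ⟨sb1, t1'⟩
        · -- exactly one start bin
          rw [hf1] at hr1f
          simp only at hr1f
          have hr2f := pvUniqueBin_fst esb ((PySem.List.pyGet? ((PySem.List.pyGet? p.1 0).getD []) 1).getD 0) st.2.1 h2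
          have hr2i := pvUniqueBin_inv esb ((PySem.List.pyGet? ((PySem.List.pyGet? p.1 0).getD []) 1).getD 0) st.2.1 h2
          rw [pvUniqueBinGo_none] at hr2f
          rcases hf2 : esb.filter (pvPA ((PySem.List.pyGet? ((PySem.List.pyGet? p.1 0).getD []) 1).getD 0)) with _ | ⟨eb0, t2⟩
          · rw [hf2] at hr2f
            refine ⟨?_, ?_, ?_⟩ <;>
              simp only [pvStepB, hg, Bool.false_eq_true, if_false, hr1f, hr2f] <;>
              first
                | (exact hr1i)
                | (exact hr2i)
                | (simp only [pvStepA]; rw [hf1, hf2]; simp)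
          · rcases t2 with _ | ⟨eb1, t2'⟩
            · -- exactly one end bin: both sides record (sb0, eb0)
              rw [hf2] at hr2f
              simp only at hr2f
              refine ⟨?_, ?_, ?_⟩ <;>
                simp only [pvStepB, hg, Bool.false_eq_true, if_false, hr1f, hr2f]
              · simp only [pvStepA]
                rw [hf1, hf2]
                simp only [List.length_singleton, ne_eq, not_true_eq_false, if_false,
                  pvGet_singleton]
                by_cases hc : st.2.2.contains (sb0, eb0)
                · rw [if_pos hc]
                  rfl
                · rw [if_neg hc]
                  have hc' : st.2.2.contains (sb0, eb0) = false := by simpa using hc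
                  have hget : st.2.2.getD (sb0, eb0) [] = [] := by
                    simp only [PySem.Dict.getD, PySem.Dict.get?]
                    rw [List.find?_eq_none.mpr ?_]
                    · rfl
                    · intro q hq hqq
                      have hcq : st.2.2.contains (sb0, eb0) = true := by
                        simp only [PySem.Dict.contains]
                        exact List.any_eq_true.mpr ⟨q, hq, hqq⟩
                      rw [hcq] at hc'
                      cases hc'
                  rw [hget]
                  rfl
              · exact hr1i
              · exact hr2i
            · -- two or more end bins
              rw [hf2] at hr2f
              simp only at hr2f
              refine ⟨?_, ?_, ?_⟩ <;>
                simp only [pvStepB, hg, Bool.false_eq_true, if_false, hr1f, hr2f]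
              · simp only [pvStepA]
                rw [hf1, hf2]
                simp
              · exact hr1i
              · exact hr2i
        · -- two or more start bins
          rw [hf1] at hr1f
          simp only at hr1f
          refine ⟨?_, ?_, ?_⟩ <;>
            simp only [pvStepB, hg, Bool.false_eq_true, if_false, hr1f]
          · simp only [pvStepA]
            rw [hf1]
            simp
          · exact hr1i
          · exact h2

-- the main induction: the B fold's output dict equals the A fold's dict
theorem pvMain (ssb esb : List (Int × Int)) :
    ∀ (l : List (List (List Int) × List Int))
      (sc ec : PySem.Dict Int (Option (Int × Int)))
      (d : PySem.Dict ((Int × Int) × (Int × Int)) (List Int)),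
      pvInv ssb sc → pvInv esb ec →
      (l.foldl (pvStepB ssb esb) (sc, ec, d)).2.2 = l.foldl (pvStepA ssb esb) d := by
  intro l
  induction l with
  | nil => intro sc ec d _ _; rfl
  | cons p l ih =>
    intro sc ec d h1 h2
    obtain ⟨he, hi1, hi2⟩ := pvStep_eq ssb esb (sc, ec, d) p h1 h2
    have h3 := ih (pvStepB ssb esb (sc, ec, d) p).1 (pvStepB ssb esb (sc, ec, d) p).2.1
      (pvStepB ssb esb (sc, ec, d) p).2.2 hi1 hi2
    simp only [Prod.mk.eta] at h3
    rw [he] at h3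
    simpa [List.foldl_cons] using h3

-- ===== VERDICT (by name: the statement is the Claim_ definition above) =====
theorem assign_se_site_bin_spec : Claim_equal_assign_se_site_bin := by
  intro site_seq ssb esb _ _
  unfold Spec_assign_se_site_bin assign_se_site_bin assign_se_site_bin_alt
  have hA : (fun (d : PySem.Dict ((Int × Int) × (Int × Int)) (List Int)) (p : List (List Int) × List Int) =>
      let site := p.1
      let seq := p.2
      let s0 := (PySem.List.pyGet? site 0).getD []
      let a := (PySem.List.pyGet? s0 0).getD 0
      let start_bin := ssb.filter (fun b => decide (b.2 ≥ a ∧ a ≥ b.1))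
      if start_bin.length ≠ 1 then d
      else
        let c := (PySem.List.pyGet? s0 1).getD 0
        let end_bin := esb.filter (fun b => decide (b.2 ≥ c ∧ c ≥ b.1))
        if end_bin.length ≠ 1 then d
        else
          let sb := (PySem.List.pyGet? start_bin 0).getD (0, 0)
          let eb := (PySem.List.pyGet? end_bin 0).getD (0, 0)
          if d.contains (sb, eb) then d.modify (sb, eb) [] (fun v => v ++ seq)
          else d.insert (sb, eb) seq) = pvStepA ssb esb := by
    funext d p
    rfl
  have hB : (fun (st : PySem.Dict Int (Option (Int × Int)) × PySem.Dict Int (Option (Int × Int)) ×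
          PySem.Dict ((Int × Int) × (Int × Int)) (List Int)) (p : List (List Int) × List Int) =>
      if ssb.isEmpty || esb.isEmpty then st
      else
        let s0 := (PySem.List.pyGet? p.1 0).getD []
        let r1 := pvUniqueBin ssb ((PySem.List.pyGet? s0 0).getD 0) st.1
        match r1.1 with
        | none => (r1.2, st.2.1, st.2.2)
        | some sb =>
          let r2 := pvUniqueBin esb ((PySem.List.pyGet? s0 1).getD 0) st.2.1
          match r2.1 with
          | none => (r1.2, r2.2, st.2.2)
          | some eb =>
            (r1.2, r2.2, st.2.2.insert (sb, eb) (st.2.2.getD (sb, eb) [] ++ p.2))) = pvStepB ssb esb := by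
    funext st p
    rfl
  rw [hA, hB]
  rw [pvMain ssb esb site_seq PySem.Dict.empty PySem.Dict.empty PySem.Dict.empty
    (pvInv_empty ssb) (pvInv_empty esb)]
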